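-- pv_equiv track=rewrite | github.com/omly97/rsa_attack | factor/strassen.py | cutting
-- ===== SOURCE A (Python) =====
-- def cutting(n):
--     ens = list(range(2, n))
--     ens_cuttted = []
--     index = 0
--     length = 1
--
--     while index < len(ens):
--         ens_cuttted.append(ens[index:index + length])
--         index += length
--         length += 1
--
--     return ens_cuttted
-- ===== SOURCE B (Python) =====
-- def cutting(n):
--     ens = list(range(2, n))
--     L = len(ens)
--     # number of chunks = count of i >= 0 with T(i) = i*(i+1)//2 < L
--     count = 0
--     t = 0
--     while t < L:
--         count += 1
--         t += count
--     return [ens[i * (i + 1) // 2:(i + 1) * (i + 2) // 2] for i in range(count)]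
-- ===== Notes on version B (the rewrite author's own statement) =====
-- stated objective: alternative
-- what changed: B replaces A's while-loop with running index/length accumulators by computing the chunk count once and emitting every chunk directly from closed-form triangular-number slice offsets i*(i+1)//2.
import Mathlib
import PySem

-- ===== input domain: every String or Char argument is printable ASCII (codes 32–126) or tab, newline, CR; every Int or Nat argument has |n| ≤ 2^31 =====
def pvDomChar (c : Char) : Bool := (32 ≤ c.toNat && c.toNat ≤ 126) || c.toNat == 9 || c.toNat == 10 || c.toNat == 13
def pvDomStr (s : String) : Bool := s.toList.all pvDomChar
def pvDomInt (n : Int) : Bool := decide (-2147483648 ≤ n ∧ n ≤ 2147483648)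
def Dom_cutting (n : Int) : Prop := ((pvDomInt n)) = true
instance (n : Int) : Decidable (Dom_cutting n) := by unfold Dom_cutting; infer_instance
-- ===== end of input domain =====

-- B builds each chunk directly from closed-form triangular-number offsets instead of A's
-- running index/length accumulators (objective: alternative; same cost).

-- ===== PORT A =====
-- A's while loop; fuel = ens.length bounds the iteration count (totality device only:
-- index grows by length ≥ 1 each iteration, so at most ens.length iterations happen).
def cuttingLoopA (ens : List Int) : Nat → Nat → Nat → List (List Int) → List (List Int)
  | 0, _, _, acc => acc
  | fuel + 1, index, length, acc =>
    if index < ens.length then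
      cuttingLoopA ens fuel (index + length) (length + 1)
        (acc ++ [PySem.List.slice ens (some (index : Int)) (some ((index : Int) + (length : Int)))])
    else acc

def cutting (n : Int) : List (List Int) :=
  let ens := PySem.List.pyRange 2 n 1
  cuttingLoopA ens ens.length 0 1 []

-- ===== PORT B =====
-- Source B's counting while loop: count of i ≥ 0 with i*(i+1)//2 < L
def cuttingCount (L : Nat) (count t : Nat) : Nat :=
  if t < L then cuttingCount L (count + 1) (t + (count + 1)) else count
termination_by L - t
decreasing_by omega

def cutting_alt (n : Int) : List (List Int) :=
  let ens := PySem.List.pyRange 2 n 1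
  let c := cuttingCount ens.length 0 0
  (List.range c).map (fun i =>
    PySem.List.slice ens (some ((i * (i + 1) / 2 : Nat) : Int))
      (some (((i + 1) * (i + 2) / 2 : Nat) : Int)))

-- ===== PRECONDITION & SPEC =====
def Spec_cutting (n : Int) (out : List (List Int)) : Prop := out = cutting_alt n
instance (n : Int) (out : List (List Int)) : Decidable (Spec_cutting n out) := by unfold Spec_cutting; infer_instance

-- ===== CLAIM (what is proved, stated in full; the proofs are below) =====
def Claim_equal_cutting : Prop := ∀ (n : Int), Dom_cutting n → Spec_cutting n (cutting n)

-- ===== LEMMAS AND PROOFS =====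

-- triangular numbers
def pvT (k : Nat) : Nat := k * (k + 1) / 2

lemma pvT_succ (k : Nat) : pvT (k + 1) = pvT k + (k + 1) := by
  unfold pvT
  have h : (k + 1) * (k + 2) = k * (k + 1) + (k + 1) * 2 := by ring
  rw [h, Nat.add_mul_div_right _ _ (by norm_num)]

-- common chunk form
def pvChunk (ens : List Int) (i : Nat) : List Int := (ens.drop (pvT i)).take (i + 1)

lemma sliceA_eq (ens : List Int) (k : Nat) :
    PySem.List.slice ens (some ((pvT k : Nat) : Int)) (some (((pvT k : Nat) : Int) + ((k + 1 : Nat) : Int)))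
      = pvChunk ens k := by
  rw [PySem.List.slice_natCast_add]; rfl

lemma sliceB_eq (ens : List Int) (i : Nat) :
    PySem.List.slice ens (some ((i * (i + 1) / 2 : Nat) : Int)) (some (((i + 1) * (i + 2) / 2 : Nat) : Int))
      = pvChunk ens i := by
  have h : ((i + 1) * (i + 2) / 2 : Nat) = pvT i + (i + 1) := pvT_succ i
  have h0 : ((i * (i + 1) / 2 : Nat) : Int) = ((pvT i : Nat) : Int) := rfl
  rw [h0, h, Nat.cast_add, PySem.List.slice_natCast_add]; rfl

lemma count_ge (L count t : Nat) : count ≤ cuttingCount L count t := by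
  unfold cuttingCount
  split
  · have := count_ge L (count + 1) (t + (count + 1)); omega
  · exact le_refl _
termination_by L - t
decreasing_by omega

lemma count_le (L count t : Nat) : cuttingCount L count t ≤ count + (L - t) := by
  unfold cuttingCount
  split
  · have := count_le L (count + 1) (t + (count + 1)); omega
  · omega
termination_by L - t
decreasing_by omega

lemma count_step (L k : Nat) (h : pvT k < L) :
    cuttingCount L k (pvT k) = cuttingCount L (k + 1) (pvT (k + 1)) := by
  rw [cuttingCount, if_pos h, pvT_succ]

lemma count_stop (L k : Nat) (h : ¬ pvT k < L) : cuttingCount L k (pvT k) = k := by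
  rw [cuttingCount, if_neg h]

lemma loop_eq (ens : List Int) (fuel : Nat) :
    ∀ (k : Nat) (acc : List (List Int)),
      cuttingCount ens.length k (pvT k) - k ≤ fuel →
      cuttingLoopA ens fuel (pvT k) (k + 1) acc =
        acc ++ (List.range' k (cuttingCount ens.length k (pvT k) - k)).map (pvChunk ens) := by
  induction fuel with
  | zero =>
    intro k acc hf
    have : cuttingCount ens.length k (pvT k) - k = 0 := Nat.le_zero.mp hf
    simp [cuttingLoopA, this]
  | succ fuel ih =>
    intro k acc hf
    by_cases h : pvT k < ens.length
    · have hc := count_step ens.length k h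
      have hge : k + 1 ≤ cuttingCount ens.length (k + 1) (pvT (k + 1)) := count_ge _ _ _
      have hslice := sliceA_eq ens k
      have : cuttingLoopA ens (fuel + 1) (pvT k) (k + 1) acc =
          cuttingLoopA ens fuel (pvT (k + 1)) (k + 2) (acc ++ [pvChunk ens k]) := by
        simp only [cuttingLoopA, if_pos h, hslice, pvT_succ]
      rw [this, ih (k + 1) (acc ++ [pvChunk ens k]) (by omega), hc]
      have hn : cuttingCount ens.length (k + 1) (pvT (k + 1)) - k
          = (cuttingCount ens.length (k + 1) (pvT (k + 1)) - (k + 1)) + 1 := by omega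
      rw [hn, List.range'_succ, List.map_cons, List.append_assoc]
      rfl
    · rw [count_stop ens.length k h]
      simp [cuttingLoopA, if_neg h]

theorem cutting_eq_alt (n : Int) : cutting n = cutting_alt n := by
  simp only [cutting, cutting_alt]
  set ens := PySem.List.pyRange 2 n 1 with hens
  have h00 : pvT 0 = 0 := rfl
  have hle : cuttingCount ens.length 0 (pvT 0) - 0 ≤ ens.length := by
    have := count_le ens.length 0 0
    rw [h00]; omega
  have := loop_eq ens ens.length 0 [] hle
  rw [h00, Nat.sub_zero] at this
  rw [this]
  simp only [List.nil_append, List.range_eq_range']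
  exact (List.map_congr_left fun i _ => (sliceB_eq ens i).symm)

-- ===== VERDICT (by name: the statement is the Claim_ definition above) =====
theorem cutting_spec : Claim_equal_cutting := by
  intro n _
  exact cutting_eq_alt n
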